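-- pv_equiv track=rewrite | github.com/SuzukiAkiro/SkyproBetaHomework_Poetry | src/masks/card.py | card_mask
-- ===== SOURCE A (Python) =====
-- def card_mask(card_number: int) -> str:
--     """
--     Принимает номер карты и возвращает замаскированую и обработаную версию
--     :param card_number: Номер для обработки
--     :return: Замаскированный номер
--     """
--     # Превращаем номер карты в список строк для замены символов на '*'
--     digit_list = list(str(card_number))
--     digit_list[6:-4] = "*" * len(digit_list[6:-4])
--     # Разделяем номер на сегменты по 4 цифры
--     separated_list = []
--     for i in range(0, len(digit_list), 4):
--         separated_list.extend([digit_list[i : i + 4]])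
--     separated_list = ["".join(item) for item in separated_list]
--     return " ".join(separated_list)
-- ===== SOURCE B (Python) =====
-- def card_mask(card_number: int) -> str:
--     """Single fused pass: walk the digits once, masking and grouping on the fly."""
--     s = str(card_number)
--     n = len(s)
--     out = []
--     for i, c in enumerate(s):
--         if i > 0 and i % 4 == 0:
--             out.append(' ')
--         out.append('*' if 6 <= i < n - 4 else c)
--     return ''.join(out)
-- ===== Notes on version B (the rewrite author's own statement) =====
-- stated objective: simpler
-- what changed: Replaces A's three passes (slice-assignment masking, a range-step-4 chunking loop, and two joins) by one fused enumerate pass that appends a separating space at every 4th index and the masked-or-original character, accumulating the output directly.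
import Mathlib
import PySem

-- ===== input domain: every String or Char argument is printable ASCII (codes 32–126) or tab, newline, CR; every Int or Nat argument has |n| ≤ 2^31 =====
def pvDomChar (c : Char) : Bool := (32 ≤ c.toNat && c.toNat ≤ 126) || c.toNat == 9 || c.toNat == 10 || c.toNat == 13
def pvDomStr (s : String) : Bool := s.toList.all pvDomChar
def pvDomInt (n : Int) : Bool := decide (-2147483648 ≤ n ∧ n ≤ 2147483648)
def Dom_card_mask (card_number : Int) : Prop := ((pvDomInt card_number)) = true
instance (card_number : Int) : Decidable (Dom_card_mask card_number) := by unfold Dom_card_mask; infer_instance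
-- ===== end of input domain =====

-- B fuses A's three passes (slice-assignment masking, range-step-4 chunking, joins) into one
-- indexed sweep over the digits; equivalence is proved for all inputs.

-- ===== PORT A =====
def card_mask (card_number : Int) : String :=
  let digit_list := PySem.Int.toChars card_number
  -- digit_list[6:-4] = "*" * len(digit_list[6:-4])  — slice ASSIGNMENT, ported by hand (exact:
  -- Python replaces the clamped region [start, stop) by the replacement, here '*'s of the slice's length)
  let stars := List.replicate (PySem.List.slice digit_list (some 6) (some (-4))).length '*'
  let start := PySem.List.clampIdx digit_list.length 6
  let stop := max start (PySem.List.clampIdx digit_list.length (-4))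
  let digit_list := digit_list.take start ++ stars ++ digit_list.drop stop
  -- for i in range(0, len(digit_list), 4): separated_list.extend([digit_list[i:i+4]])
  let separated_list := (PySem.List.pyRange 0 (digit_list.length : Int) 4).foldl
      (fun acc i => acc ++ [PySem.List.slice digit_list (some i) (some (i + 4))]) []
  -- separated_list = ["".join(item) for item in separated_list]  (item is a list of chars here)
  let separated_list := separated_list.map (fun item => String.ofList item)
  -- " ".join(separated_list)
  PySem.Str.join " " separated_list

-- ===== PORT B =====
def card_mask_alt (card_number : Int) : String :=
  let s := PySem.Int.toChars card_number
  let n : Int := s.length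
  -- for i, c in enumerate(s): append ' ' when i > 0 and i % 4 == 0, then '*' or c
  let out := (PySem.List.enumerate s).foldl
      (fun (acc : List Char) (p : Int × Char) =>
        (if 0 < p.1 ∧ PySem.Int.mod p.1 4 = 0 then acc ++ [' '] else acc) ++
        [if 6 ≤ p.1 ∧ p.1 < n - 4 then '*' else p.2]) []
  -- ''.join(out)
  String.ofList out

-- ===== PRECONDITION & SPEC =====
def Spec_card_mask (card_number : Int) (out : String) : Prop := out = card_mask_alt card_number
instance (card_number : Int) (out : String) : Decidable (Spec_card_mask card_number out) := by unfold Spec_card_mask; infer_instance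

-- ===== CLAIM (what is proved, stated in full; the proofs are below) =====
def Claim_equal_card_mask : Prop := ∀ (card_number : Int), Dom_card_mask card_number → Spec_card_mask card_number (card_mask card_number)

-- ===== LEMMAS AND PROOFS =====

-- the masked digit list: '*' at positions 6 ≤ i < n-4, both programs produce it
def mlist (l : List Char) : List Char :=
  l.mapIdx (fun i c => if 6 ≤ i ∧ i + 4 < l.length then '*' else c)

-- chunks of 4, the common grouping
def chunk4 (M : List Char) : List (List Char) :=
  if M = [] then [] else M.take 4 :: chunk4 (M.drop 4)
termination_by M.length
decreasing_by
  rename_i h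
  simp only [List.length_drop]
  have hne : M.length ≠ 0 := fun hn => h (List.eq_nil_of_length_eq_zero hn)
  omega

theorem chunk4_nil_iff (M : List Char) : chunk4 M = [] ↔ M = [] := by
  rw [chunk4]; split_ifs with h <;> simp [h]

theorem join_cons_char (sep x : List Char) (rest : List (List Char)) :
    PySem.Chars.join sep (x :: rest)
      = x ++ (if rest = [] then [] else sep ++ PySem.Chars.join sep rest) := by
  match rest with
  | [] => simp [PySem.Chars.join_singleton]
  | y :: t => rw [PySem.Chars.join_cons_cons]; simp

-- A's slice assignment равно the masked list
theorem L1_mask (l : List Char) :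
    l.take (PySem.List.clampIdx l.length 6)
      ++ List.replicate (PySem.List.slice l (some 6) (some (-4))).length '*'
      ++ l.drop (max (PySem.List.clampIdx l.length 6) (PySem.List.clampIdx l.length (-4)))
    = mlist l := by
  have hc6 : PySem.List.clampIdx l.length 6 = min 6 l.length := by
    simpa using PySem.List.clampIdx_natCast l.length 6
  have hc4 : PySem.List.clampIdx l.length (-4) = l.length - 4 := by
    simpa using PySem.List.clampIdx_neg_ofNat l.length 4 (by omega)
  rw [PySem.List.length_slice, hc6, hc4]
  set n := l.length with hn
  have hln : (mlist l).length = n := by simp only [mlist, List.length_mapIdx]; exact hn.symm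
  apply List.ext_getElem
  · simp [mlist, ← hn]
    omega
  · intro i hi1 hi2
    have hin : i < n := by omega
    simp only [mlist, List.getElem_mapIdx]
    by_cases h2 : i < min 6 n + ((n - 4) - min 6 n)
    · rw [List.getElem_append_left (by simp; omega)]
      by_cases h1 : i < min 6 n
      · rw [List.getElem_append_left (by simp; omega), List.getElem_take, if_neg (by omega)]
      · rw [List.getElem_append_right (by simp; omega), List.getElem_replicate,
          if_pos (by constructor <;> omega)]
    · rw [List.getElem_append_right (by simp; omega), List.getElem_drop, if_neg (by omega)]
      congr 1
      simp
      omega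

theorem pyRange4_nil (a b : Int) (h : b ≤ a) : PySem.List.pyRange a b 4 = [] := by
  rw [PySem.List.pyRange_of_pos a b (by omega)]
  simp [show ¬ a < b by omega]

theorem pyRange4_cons (a b : Int) (h : a < b) :
    PySem.List.pyRange a b 4 = a :: PySem.List.pyRange (a + 4) b 4 := by
  rw [PySem.List.pyRange_of_pos a b (by omega), PySem.List.pyRange_of_pos (a+4) b (by omega)]
  have hm : ((b - a + 4 - 1) / 4).toNat = (if a + 4 < b then ((b - (a+4) + 4 - 1) / 4).toNat else 0) + 1 := by
    split_ifs with h4 <;> omega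
  rw [if_pos h, hm, List.range_succ_eq_map]
  simp [List.map_map, Function.comp]
  intro k _
  ring

-- A's chunking loop builds chunk4
theorem L2_chunks (full : List Char) (q : Nat) (acc : List (List Char)) :
    (PySem.List.pyRange (4 * (q : Int)) (full.length : Int) 4).foldl
      (fun acc i => acc ++ [PySem.List.slice full (some i) (some (i + 4))]) acc
    = acc ++ chunk4 (full.drop (4 * q)) := by
  by_cases h : full.length ≤ 4 * q
  · rw [pyRange4_nil _ _ (by exact_mod_cast h)]
    rw [List.drop_eq_nil_of_le h]
    simp [chunk4]
  · rw [pyRange4_cons _ _ (by exact_mod_cast Nat.lt_of_not_le h)]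
    simp only [List.foldl_cons]
    have hs : PySem.List.slice full (some (4 * (q:Int))) (some (4 * (q:Int) + 4)) = (full.drop (4*q)).take 4 := by
      have h0 := PySem.List.slice_natCast_add full (4*q) 4
      push_cast at h0
      exact h0
    have h4 : (4 * (q:Int) + 4) = 4 * ((q+1 : Nat) : Int) := by push_cast; ring
    rw [hs]
    rw [h4]
    rw [L2_chunks full (q+1) (acc ++ [(full.drop (4*q)).take 4])]
    have hd : full.drop (4 * (q+1)) = (full.drop (4*q)).drop 4 := by
      rw [List.drop_drop]; congr 1
    rw [hd]
    conv_rhs => rw [chunk4]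
    rw [if_neg (by intro hn; exact h (by simpa using List.drop_eq_nil_iff.mp hn))]
    simp
termination_by full.length - 4 * q
decreasing_by omega

-- B's masking-on-the-fly fold is the plain fold over the masked enumerated list
theorem L3_fuse (N : Int) (l : List Char) (j : Int) (acc : List Char) :
    (PySem.List.enumerate l j).foldl
      (fun (acc : List Char) (p : Int × Char) =>
        (if 0 < p.1 ∧ PySem.Int.mod p.1 4 = 0 then acc ++ [' '] else acc) ++
        [if 6 ≤ p.1 ∧ p.1 < N - 4 then '*' else p.2]) acc
    = (PySem.List.enumerate ((PySem.List.enumerate l j).map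
        (fun p => if 6 ≤ p.1 ∧ p.1 < N - 4 then '*' else p.2)) j).foldl
      (fun (acc : List Char) (p : Int × Char) =>
        (if 0 < p.1 ∧ PySem.Int.mod p.1 4 = 0 then acc ++ [' '] else acc) ++ [p.2]) acc := by
  induction l generalizing j acc with
  | nil => simp [PySem.List.enumerate_nil]
  | cons x t ih =>
    rw [PySem.List.enumerate_cons]
    simp only [List.map_cons, PySem.List.enumerate_cons, List.foldl_cons]
    exact ih (j+1) _

theorem L5_enum_map (l : List Char) :
    (PySem.List.enumerate l 0).map (fun p => if 6 ≤ p.1 ∧ p.1 < (l.length : Int) - 4 then '*' else p.2)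
    = mlist l := by
  apply List.ext_getElem
  · simp [mlist, PySem.List.length_enumerate]
  · intro i h1 h2
    simp only [List.getElem_map, mlist, List.getElem_mapIdx]
    rw [PySem.List.getElem_enumerate]
    simp only [zero_add]
    exact if_congr (by constructor <;> intro hh <;> omega) rfl rfl

-- the space-inserting fold groups the list back into chunks of 4
theorem L4_group (M : List Char) (q : Nat) (acc : List Char) :
    (PySem.List.enumerate M (4 * (q : Int))).foldl
      (fun (acc : List Char) (p : Int × Char) =>
        (if 0 < p.1 ∧ PySem.Int.mod p.1 4 = 0 then acc ++ [' '] else acc) ++ [p.2]) acc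
    = acc ++ (if q ≠ 0 ∧ M ≠ [] then [' '] else []) ++ PySem.Chars.join [' '] (chunk4 M) := by
  have hmod0 : PySem.Int.mod (4 * (q:Int)) 4 = 0 := by
    rw [PySem.Int.mod_eq_emod_of_pos (by omega)]; omega
  have hmodr : ∀ x : Int, 4 * (q:Int) < x → x < 4 * (q:Int) + 4 →
      ¬ (0 < x ∧ PySem.Int.mod x 4 = 0) := by
    intro x h1 h2 hc
    rw [PySem.Int.mod_eq_emod_of_pos (by omega)] at hc
    rcases hc with ⟨_, hc⟩
    omega
  match M with
  | [] => simp [chunk4, PySem.List.enumerate_nil, PySem.Chars.join_nil]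
  | [a] =>
    simp only [PySem.List.enumerate_cons, PySem.List.enumerate_nil, List.foldl_cons, List.foldl_nil]
    rw [show chunk4 [a] = [[a]] by simp [chunk4], PySem.Chars.join_singleton]
    by_cases hq : q = 0
    · simp [hq]
    · rw [if_pos ⟨by omega, hmod0⟩, if_pos (by simp [hq])]
  | [a, b] =>
    simp only [PySem.List.enumerate_cons, PySem.List.enumerate_nil, List.foldl_cons, List.foldl_nil]
    rw [show chunk4 [a,b] = [[a,b]] by simp [chunk4], PySem.Chars.join_singleton]
    rw [if_neg (hmodr _ (by omega) (by omega))]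
    by_cases hq : q = 0
    · simp [hq]
    · rw [if_pos ⟨by omega, hmod0⟩, if_pos (by simp [hq])]
      simp
  | [a, b, c] =>
    simp only [PySem.List.enumerate_cons, PySem.List.enumerate_nil, List.foldl_cons, List.foldl_nil]
    rw [show chunk4 [a,b,c] = [[a,b,c]] by simp [chunk4], PySem.Chars.join_singleton]
    rw [if_neg (hmodr _ (by omega) (by omega)), if_neg (hmodr _ (by omega) (by omega))]
    by_cases hq : q = 0
    · simp [hq]
    · rw [if_pos ⟨by omega, hmod0⟩, if_pos (by simp [hq])]
      simp
  | [a, b, c, d] =>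
    simp only [PySem.List.enumerate_cons, PySem.List.enumerate_nil, List.foldl_cons, List.foldl_nil]
    rw [show chunk4 [a,b,c,d] = [[a,b,c,d]] by simp [chunk4], PySem.Chars.join_singleton]
    rw [if_neg (hmodr _ (by omega) (by omega)), if_neg (hmodr _ (by omega) (by omega)),
        if_neg (hmodr _ (by omega) (by omega))]
    by_cases hq : q = 0
    · simp [hq]
    · rw [if_pos ⟨by omega, hmod0⟩, if_pos (by simp [hq])]
      simp
  | a :: b :: c :: d :: e :: rest =>
    rw [PySem.List.enumerate_cons, PySem.List.enumerate_cons, PySem.List.enumerate_cons,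
        PySem.List.enumerate_cons]
    simp only [List.foldl_cons]
    rw [if_neg (hmodr (4*(q:Int)+1) (by omega) (by omega)),
        if_neg (hmodr (4*(q:Int)+1+1) (by omega) (by omega)),
        if_neg (hmodr (4*(q:Int)+1+1+1) (by omega) (by omega))]
    have h4 : (4 * (q:Int) + 1 + 1 + 1 + 1) = 4 * ((q+1 : Nat) : Int) := by push_cast; ring
    rw [h4]
    rw [L4_group (e :: rest) (q+1)]
    have hch : chunk4 (a :: b :: c :: d :: e :: rest) = [a,b,c,d] :: chunk4 (e :: rest) := by
      rw [chunk4]; simp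
    rw [hch, join_cons_char]
    rw [if_neg (show ¬ chunk4 (e :: rest) = [] from by rw [chunk4_nil_iff]; simp)]
    rw [if_pos (show ((q+1 : Nat) ≠ 0 ∧ e :: rest ≠ []) from ⟨by omega, by simp⟩)]
    by_cases hq : q = 0
    · simp [hq]
    · rw [if_pos ⟨by omega, hmod0⟩]
      simp [hq]

-- ===== VERDICT (by name: the statement is the Claim_ definition above) =====
theorem card_mask_spec : Claim_equal_card_mask := by
  intro cn _
  unfold Spec_card_mask card_mask card_mask_alt
  simp only []
  rw [← String.toList_inj]
  rw [L1_mask]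
  -- A side: chunk loop
  have hA := L2_chunks (mlist (PySem.Int.toChars cn)) 0 []
  simp only [Nat.cast_zero, mul_zero, List.drop_zero, List.nil_append] at hA
  rw [hA]
  -- B side: fuse, mask, group
  rw [L3_fuse ((PySem.Int.toChars cn).length : Int) (PySem.Int.toChars cn) 0 []]
  rw [L5_enum_map]
  have hB := L4_group (mlist (PySem.Int.toChars cn)) 0 []
  simp only [Nat.cast_zero, mul_zero, ne_eq, not_true_eq_false, false_and, if_false,
    List.nil_append] at hB
  rw [hB]
  rw [PySem.Str.toList_join, String.toList_ofList]
  rw [List.map_map]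
  simp only [Function.comp_def, String.toList_ofList, List.map_id']
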